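-- pv_equiv track=rewrite | github.com/benny1261/AI_with_hsi | spectrum_observer.py | longest_slice_between_duplicate_elements
-- ===== SOURCE A (Python) =====
-- def longest_slice_between_duplicate_elements(lst):
--     seen = {}       # Dictionary to store the seen elements and their indices
--     longest_slice = []
--
--     for i, element in enumerate(lst):
--         if element in seen:
--             current_slice = lst[seen[element]:i]  # Get the slice between the duplicates
--             if len(current_slice) > len(longest_slice):
--                 longest_slice = current_slice
--
--         seen[element] = i       # Store the element and its index
--     return longest_slice        # return empty array if no same element found
-- ===== SOURCE B (Python) =====
-- def longest_slice_between_duplicate_elements(lst):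
--     # One pass groups all occurrence indices per element; candidates are the
--     # gaps between consecutive occurrences; lexicographic max on (length, -end)
--     # reproduces A's earliest-winner tie-breaking.
--     occ = {}
--     for i, x in enumerate(lst):
--         occ.setdefault(x, []).append(i)
--     pairs = [(cur - prev, -cur)
--              for idxs in occ.values()
--              for prev, cur in zip(idxs, idxs[1:])]
--     if not pairs:
--         return []
--     length, neg_end = max(pairs)
--     return lst[-neg_end - length:-neg_end]
-- ===== Notes on version B (the rewrite author's own statement) =====
-- stated objective: alternative
-- what changed: A keeps a last-seen-index dict and materialises and compares a candidate slice at every duplicate; B instead groups all occurrence indices per element in one pass, forms the (length, -end) gap pairs of consecutive occurrences, takes their lexicographic maximum (which reproduces A's earliest-winner tie-breaking) and slices the list once at the end.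
import Mathlib
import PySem

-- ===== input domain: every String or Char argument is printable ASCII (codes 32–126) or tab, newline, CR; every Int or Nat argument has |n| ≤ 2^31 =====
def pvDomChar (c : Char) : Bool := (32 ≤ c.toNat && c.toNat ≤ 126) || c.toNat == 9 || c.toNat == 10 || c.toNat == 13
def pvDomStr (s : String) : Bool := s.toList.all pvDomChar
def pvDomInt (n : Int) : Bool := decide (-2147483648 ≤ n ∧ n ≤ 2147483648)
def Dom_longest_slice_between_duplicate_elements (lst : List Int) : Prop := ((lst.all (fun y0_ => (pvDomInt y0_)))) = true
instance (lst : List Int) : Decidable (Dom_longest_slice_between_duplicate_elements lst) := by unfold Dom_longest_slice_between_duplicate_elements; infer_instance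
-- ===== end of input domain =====

-- B replaces A's running "materialise every candidate slice and compare" loop by a grouped index-gap scan
-- (dict of occurrence index lists, lexicographic max on (length, -end), one final slice): alternative decomposition.

-- ===== PORT A =====
-- one loop iteration of A: dict lookup, optional slice + comparison, dict store
def stepA (L : List Int) (st : PySem.Dict Int Int × List Int) (p : Int × Int) :
    PySem.Dict Int Int × List Int :=
  match st.1.get? p.2 with
  | some j =>
      let cur := PySem.List.slice L (some j) (some p.1)
      (st.1.insert p.2 p.1, if cur.length > st.2.length then cur else st.2)
  | none => (st.1.insert p.2 p.1, st.2)

def longest_slice_between_duplicate_elements (lst : List Int) : List Int :=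
  ((PySem.List.enumerate lst 0).foldl (stepA lst) (PySem.Dict.empty, ([] : List Int))).2

-- ===== PORT B =====
-- occ.setdefault(x, []).append(i) over enumerate(lst)
def buildOcc (lst : List Int) : PySem.Dict Int (List Int) :=
  (PySem.List.enumerate lst 0).foldl
    (fun occ p => occ.modify p.2 [] (fun v => v ++ [p.1])) PySem.Dict.empty

-- [(cur - prev, -cur) for prev, cur in zip(idxs, idxs[1:])]
def gapsB (idxs : List Int) : List (Int × Int) :=
  (idxs.zip (PySem.List.slice idxs (some 1) none)).map (fun q => (q.2 - q.1, -q.2))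

def longest_slice_between_duplicate_elements_alt (lst : List Int) : List Int :=
  let pairs := (buildOcc lst).values.flatMap gapsB
  match PySem.List.max2? pairs Prod.fst Prod.snd with
  | none => []
  | some m => PySem.List.slice lst (some (-m.2 - m.1)) (some (-m.2))

-- ===== PRECONDITION & SPEC =====
def Spec_longest_slice_between_duplicate_elements (lst : List Int) (out : List Int) : Prop := out = longest_slice_between_duplicate_elements_alt lst
instance (lst : List Int) (out : List Int) : Decidable (Spec_longest_slice_between_duplicate_elements lst out) := by unfold Spec_longest_slice_between_duplicate_elements; infer_instance

-- ===== CLAIM (what is proved, stated in full; the proofs are below) =====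
def Claim_equal_longest_slice_between_duplicate_elements : Prop := ∀ (lst : List Int), Dom_longest_slice_between_duplicate_elements lst → Spec_longest_slice_between_duplicate_elements lst (longest_slice_between_duplicate_elements lst)

-- ===== LEMMAS AND PROOFS =====

-- indices (as Ints) at which x occurs in l
def idxsOf (l : List Int) (x : Int) : List Int :=
  (PySem.List.enumerate l 0).filterMap (fun p => if p.2 = x then some p.1 else none)

def gapsP (is : List Int) : List (Int × Int) :=
  (is.zip is.tail).map (fun q => (q.2 - q.1, -q.2))

-- all candidate (length, -end) pairs of l, grouped by element
def pairsOf (l : List Int) : List (Int × Int) :=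
  (PySem.List.dedup l).flatMap (fun x => gapsP (idxsOf l x))

def lexLe (a b : Int × Int) : Prop := a.1 < b.1 ∨ (a.1 = b.1 ∧ a.2 ≤ b.2)

def isBest (ps : List (Int × Int)) (m : Int × Int) : Prop := m ∈ ps ∧ ∀ y ∈ ps, lexLe y m

def loopA (L l : List Int) : PySem.Dict Int Int × List Int :=
  (PySem.List.enumerate l 0).foldl (stepA L) (PySem.Dict.empty, ([] : List Int))

-- A's loop output characterisation: [] if no duplicate pair, else the slice of the best pair
def OutInv (L l : List Int) (out : List Int) : Prop :=
  ((∀ y, y ∉ pairsOf l) ∧ out = []) ∨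
  (∃ m, isBest (pairsOf l) m ∧
    out = PySem.List.slice L (some (-m.2 - m.1)) (some (-m.2)) ∧ (out.length : Int) = m.1)

lemma gapsB_eq_gapsP (is : List Int) : gapsB is = gapsP is := by
  simp [gapsB, gapsP, PySem.List.slice_from_one]

lemma lexLe_refl (a : Int × Int) : lexLe a a := by unfold lexLe; omega

lemma lexLe_trans {a b c : Int × Int} (h1 : lexLe a b) (h2 : lexLe b c) : lexLe a c := by
  unfold lexLe at *; omega

lemma isBest_unique {ps : List (Int × Int)} {m m' : Int × Int}
    (h : isBest ps m) (h' : isBest ps m') : m = m' := by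
  have h1 := h.2 m' h'.1
  have h2 := h'.2 m h.1
  unfold lexLe at h1 h2
  have : m.1 = m'.1 ∧ m.2 = m'.2 := by omega
  exact Prod.ext this.1 this.2

lemma getLast?_mem : ∀ {l : List Int} {a : Int}, l.getLast? = some a → a ∈ l := by
  intro l
  induction l with
  | nil => simp
  | cons b t ih =>
    intro a h
    cases t with
    | nil => simp at h; simp [h]
    | cons c u =>
      rw [List.getLast?_cons_cons] at h
      exact List.mem_cons_of_mem _ (ih h)

lemma getLast?_none : ∀ {l : List Int}, l.getLast? = none → l = [] := by
  intro l
  induction l with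
  | nil => intro _; rfl
  | cons b t ih =>
    intro h
    cases t with
    | nil => simp at h
    | cons c u => rw [List.getLast?_cons_cons] at h; exact absurd (ih h) (by simp)

lemma idxsOf_append (l : List Int) (x y : Int) :
    idxsOf (l ++ [x]) y = idxsOf l y ++ (if x = y then [(l.length : Int)] else []) := by
  unfold idxsOf
  rw [PySem.List.enumerate_append, List.filterMap_append]
  congr 1
  simp only [PySem.List.enumerate_cons, PySem.List.enumerate_nil, List.filterMap_cons,
    List.filterMap_nil, zero_add]
  by_cases h : x = y <;> simp [h]

lemma mem_idxsOf_bounds {l : List Int} {x j : Int} (h : j ∈ idxsOf l x) :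
    0 ≤ j ∧ j < (l.length : Int) := by
  unfold idxsOf at h
  rw [List.mem_filterMap] at h
  obtain ⟨p, hp, hpj⟩ := h
  rw [PySem.List.mem_enumerate_iff] at hp
  obtain ⟨k, hk, rfl⟩ := hp
  by_cases hx : l[k] = x
  · simp [hx] at hpj; omega
  · simp [hx] at hpj

lemma idxsOf_eq_nil_iff {l : List Int} {x : Int} : idxsOf l x = [] ↔ x ∉ l := by
  unfold idxsOf
  rw [List.filterMap_eq_nil_iff]
  constructor
  · intro h hx
    obtain ⟨k, hk, hkx⟩ := List.mem_iff_getElem.mp hx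
    have := h ((k : Int), x) (by
      rw [PySem.List.mem_enumerate_iff]
      exact ⟨k, hk, by simp [hkx]⟩)
    simp at this
  · intro hx p hp
    rw [PySem.List.mem_enumerate_iff] at hp
    obtain ⟨k, hk, rfl⟩ := hp
    have : l[k] ∈ l := List.getElem_mem hk
    by_cases he : l[k] = x
    · exact absurd (he ▸ this) hx
    · simp [he]

lemma pairwise_idxsOf (l : List Int) (x : Int) : (idxsOf l x).Pairwise (· < ·) := by
  unfold idxsOf
  rw [List.pairwise_filterMap]
  apply (PySem.List.pairwise_lt_enumerate l 0).imp
  intro a b hab c hc d hd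
  by_cases h1 : a.2 = x
  · by_cases h2 : b.2 = x
    · simp [h1] at hc; simp [h2] at hd; omega
    · simp [h2] at hd
  · simp [h1] at hc

lemma zip_tail_lt : ∀ {is : List Int}, is.Pairwise (· < ·) →
    ∀ {p c : Int}, (p, c) ∈ is.zip is.tail → p < c := by
  intro is
  induction is with
  | nil => intro _ p c h; simp at h
  | cons a t ih =>
    intro hpw p c h
    cases t with
    | nil => simp at h
    | cons b u =>
      simp only [List.tail_cons, List.zip_cons_cons, List.mem_cons] at h
      rcases h with h | h
      · rw [Prod.mk.injEq] at h
        obtain ⟨rfl, rfl⟩ := h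
        exact (List.pairwise_cons.mp hpw).1 c (by simp)
      · exact ih (List.pairwise_cons.mp hpw).2 h

lemma mem_gapsP {is : List Int} {y : Int × Int} (h : y ∈ gapsP is) :
    ∃ p c, (p, c) ∈ is.zip is.tail ∧ y = (c - p, -c) := by
  unfold gapsP at h
  rw [List.mem_map] at h
  obtain ⟨⟨p, c⟩, hpc, rfl⟩ := h
  exact ⟨p, c, hpc, rfl⟩

lemma gapsP_concat : ∀ {is : List Int} {j : Int}, is.getLast? = some j →
    ∀ (n : Int), gapsP (is ++ [n]) = gapsP is ++ [(n - j, -n)] := by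
  intro is
  induction is with
  | nil => intro j h; simp at h
  | cons a t ih =>
    intro j h n
    cases t with
    | nil =>
      simp at h
      subst h
      simp [gapsP]
    | cons b u =>
      rw [List.getLast?_cons_cons] at h
      have hstep : ∀ (r : List Int), gapsP (a :: b :: r) = (b - a, -b) :: gapsP (b :: r) := by
        intro r; simp [gapsP]
      have ih' := ih h n
      simp only [List.cons_append] at ih' ⊢
      rw [hstep (u ++ [n]), hstep u]
      rw [ih', List.cons_append]

lemma mem_pairsOf_bounds {l : List Int} {y : Int × Int} (h : y ∈ pairsOf l) :
    0 < y.1 ∧ -(l.length : Int) < y.2 ∧ 0 ≤ -y.2 - y.1 := by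
  unfold pairsOf at h
  rw [List.mem_flatMap] at h
  obtain ⟨x, _, hy⟩ := h
  obtain ⟨p, c, hpc, rfl⟩ := mem_gapsP hy
  have hlt := zip_tail_lt (pairwise_idxsOf l x) hpc
  obtain ⟨hp, hc⟩ := List.of_mem_zip hpc
  have hc' : c ∈ idxsOf l x := List.mem_of_mem_tail hc
  have hb1 := mem_idxsOf_bounds hp
  have hb2 := mem_idxsOf_bounds hc'
  show 0 < c - p ∧ -(l.length : Int) < -c ∧ 0 ≤ -(-c) - (c - p)
  omega

lemma dedup_concat (l : List Int) (x : Int) :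
    PySem.List.dedup (l ++ [x]) = PySem.List.dedup l ++ (if x ∈ l then [] else [x]) := by
  have h : PySem.List.dedup (l ++ [x]) = PySem.Set.add (PySem.List.dedup l) x := by
    simp [PySem.List.dedup, PySem.Set.ofList, List.foldl_append]
  rw [h]
  unfold PySem.Set.add
  by_cases hx : x ∈ l
  · rw [if_pos, if_pos hx]
    · simp
    · have : x ∈ PySem.List.dedup l := (PySem.List.mem_dedup l x).mpr hx
      simpa using this
  · rw [if_neg, if_neg hx]
    have : x ∉ PySem.List.dedup l := fun hm => hx ((PySem.List.mem_dedup l x).mp hm)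
    simpa using this

lemma mem_pairsOf_concat_of_not_mem {l : List Int} {x : Int} (hx : x ∉ l) (y : Int × Int) :
    y ∈ pairsOf (l ++ [x]) ↔ y ∈ pairsOf l := by
  unfold pairsOf
  rw [dedup_concat, if_neg hx, List.flatMap_append]
  have hnew : List.flatMap (fun z => gapsP (idxsOf (l ++ [x]) z)) [x] = [] := by
    simp only [List.flatMap_cons, List.flatMap_nil, List.append_nil]
    rw [idxsOf_append, if_pos rfl, idxsOf_eq_nil_iff.mpr hx, List.nil_append]
    simp [gapsP]
  rw [hnew, List.append_nil]
  constructor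
  · intro h
    rw [List.mem_flatMap] at h ⊢
    obtain ⟨z, hz, hy⟩ := h
    have hzx : z ≠ x := fun h' => hx (h' ▸ (PySem.List.mem_dedup l z).mp hz)
    rw [idxsOf_append, if_neg (fun h' => hzx h'.symm), List.append_nil] at hy
    exact ⟨z, hz, hy⟩
  · intro h
    rw [List.mem_flatMap] at h ⊢
    obtain ⟨z, hz, hy⟩ := h
    have hzx : z ≠ x := fun h' => hx (h' ▸ (PySem.List.mem_dedup l z).mp hz)
    refine ⟨z, hz, ?_⟩
    rw [idxsOf_append, if_neg (fun h' => hzx h'.symm), List.append_nil]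
    exact hy

lemma mem_pairsOf_concat_of_mem {l : List Int} {x j : Int} (hx : x ∈ l)
    (hj : (idxsOf l x).getLast? = some j) (y : Int × Int) :
    y ∈ pairsOf (l ++ [x]) ↔ y ∈ pairsOf l ∨ y = ((l.length : Int) - j, -(l.length : Int)) := by
  unfold pairsOf
  rw [dedup_concat, if_pos hx, List.append_nil]
  rw [List.mem_flatMap, List.mem_flatMap]
  constructor
  · rintro ⟨z, hz, hy⟩
    by_cases hzx : z = x
    · subst hzx
      rw [idxsOf_append, if_pos rfl, gapsP_concat hj, List.mem_append] at hy
      rcases hy with hy | hy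
      · exact Or.inl ⟨z, hz, hy⟩
      · simp only [List.mem_singleton] at hy
        exact Or.inr hy
    · rw [idxsOf_append, if_neg (fun h => hzx h.symm), List.append_nil] at hy
      exact Or.inl ⟨z, hz, hy⟩
  · rintro (⟨z, hz, hy⟩ | hy)
    · refine ⟨z, hz, ?_⟩
      by_cases hzx : z = x
      · subst hzx
        rw [idxsOf_append, if_pos rfl, gapsP_concat hj]
        exact List.mem_append_left _ hy
      · rw [idxsOf_append, if_neg (fun h => hzx h.symm), List.append_nil]
        exact hy
    · refine ⟨x, (PySem.List.mem_dedup l x).mpr hx, ?_⟩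
      rw [idxsOf_append, if_pos rfl, gapsP_concat hj]
      subst hy
      simp

lemma max2?_step (a y : Int × Int) (t : List (Int × Int)) :
    PySem.List.max2? (a :: y :: t) Prod.fst Prod.snd =
    PySem.List.max2? ((if a.1 < y.1 ∨ (a.1 ≤ y.1 ∧ a.2 < y.2) then y else a) :: t)
      Prod.fst Prod.snd := by
  by_cases hp : a.1 < y.1 ∨ (a.1 ≤ y.1 ∧ a.2 < y.2) <;> simp [PySem.List.max2?, hp]

lemma max2?_isBest : ∀ (t : List (Int × Int)) (a : Int × Int),
    ∃ m, PySem.List.max2? (a :: t) Prod.fst Prod.snd = some m ∧ isBest (a :: t) m := by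
  intro t
  induction t with
  | nil =>
    intro a
    refine ⟨a, rfl, by simp, ?_⟩
    intro z hz
    rw [List.mem_singleton] at hz
    subst hz
    exact lexLe_refl _
  | cons y t ih =>
    intro a
    rw [max2?_step]
    by_cases hp : a.1 < y.1 ∨ (a.1 ≤ y.1 ∧ a.2 < y.2)
    · rw [if_pos hp]
      obtain ⟨m, hm, hb⟩ := ih y
      have hay : lexLe a y := by unfold lexLe; omega
      refine ⟨m, hm, List.mem_cons_of_mem _ hb.1, ?_⟩
      intro z hz
      rcases List.mem_cons.mp hz with rfl | hz'
      · exact lexLe_trans hay (hb.2 y (by simp))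
      · exact hb.2 z hz'
    · rw [if_neg hp]
      obtain ⟨m, hm, hb⟩ := ih a
      have hya : lexLe y a := by unfold lexLe; omega
      refine ⟨m, hm, ?_, ?_⟩
      · rcases List.mem_cons.mp hb.1 with rfl | h
        · exact List.mem_cons_self ..
        · exact List.mem_cons_of_mem _ (List.mem_cons_of_mem _ h)
      · intro z hz
        rcases List.mem_cons.mp hz with rfl | hz'
        · exact hb.2 z (by simp)
        · rcases List.mem_cons.mp hz' with rfl | hz''
          · exact lexLe_trans hya (hb.2 a (by simp))
          · exact hb.2 z (List.mem_cons_of_mem _ hz'')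

lemma length_slice_int (L : List Int) {a b : Int} (h0 : 0 ≤ a) (hab : a ≤ b)
    (hbl : b ≤ (L.length : Int)) :
    ((PySem.List.slice L (some a) (some b)).length : Int) = b - a := by
  rw [PySem.List.length_slice]
  unfold PySem.List.clampIdx
  rw [if_neg (by omega), if_neg (by omega)]
  omega

lemma loopA_concat (L l : List Int) (x : Int) :
    loopA L (l ++ [x]) = stepA L (loopA L l) ((l.length : Int), x) := by
  unfold loopA
  rw [PySem.List.enumerate_append, List.foldl_append]
  simp [PySem.List.enumerate_cons, PySem.List.enumerate_nil]

lemma pairsOf_nil : pairsOf [] = [] := by simp [pairsOf]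

lemma stepA_eq_none (L : List Int) (st : PySem.Dict Int Int × List Int) (i x : Int)
    (h : st.1.get? x = none) :
    stepA L st (i, x) = (st.1.insert x i, st.2) := by
  unfold stepA
  dsimp only
  rw [h]

lemma stepA_eq_some (L : List Int) (st : PySem.Dict Int Int × List Int) (i x j : Int)
    (h : st.1.get? x = some j) :
    stepA L st (i, x) =
      (st.1.insert x i,
        if (PySem.List.slice L (some j) (some i)).length > st.2.length
        then PySem.List.slice L (some j) (some i) else st.2) := by
  unfold stepA
  dsimp only
  rw [h]

lemma A_loop (L : List Int) : ∀ l, l <+: L →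
    (∀ x : Int, (loopA L l).1.get? x = (idxsOf l x).getLast?) ∧ OutInv L l (loopA L l).2 := by
  intro l
  induction l using List.reverseRecOn with
  | nil =>
    intro _
    refine ⟨?_, ?_⟩
    · intro x
      show (PySem.Dict.empty : PySem.Dict Int Int).get? x = ([] : List Int).getLast?
      rw [PySem.Dict.get?_empty]
      rfl
    · left
      refine ⟨?_, rfl⟩
      intro y hy
      rw [pairsOf_nil] at hy
      simp at hy
  | append_singleton l x ih =>
    intro hpre
    have hl : l <+: L := (List.prefix_append l [x]).trans hpre
    obtain ⟨hseen, hout⟩ := ih hl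
    have hlenL : l.length + 1 ≤ L.length := by
      have := hpre.length_le
      simpa using this
    rw [loopA_concat]
    cases hj : (loopA L l).1.get? x with
    | none =>
      have h0 : (idxsOf l x).getLast? = none := by rw [← hseen x]; exact hj
      have hnil : idxsOf l x = [] := getLast?_none h0
      have hx : x ∉ l := idxsOf_eq_nil_iff.mp hnil
      rw [stepA_eq_none L _ _ x hj]
      refine ⟨?_, ?_⟩
      · intro y
        by_cases hyx : y = x
        · subst hyx
          show ((loopA L l).1.insert y (l.length : Int)).get? y = _
          rw [PySem.Dict.get?_insert_self, idxsOf_append, if_pos rfl, hnil, List.nil_append]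
          rfl
        · show ((loopA L l).1.insert x (l.length : Int)).get? y = _
          rw [PySem.Dict.get?_insert_of_ne _ _ hyx, hseen y,
              idxsOf_append, if_neg (fun h => hyx h.symm), List.append_nil]
      · show OutInv L (l ++ [x]) (loopA L l).2
        rcases hout with ⟨hemp, hnil2⟩ | ⟨m, hb, hsl, hml⟩
        · left
          exact ⟨fun y hy => hemp y ((mem_pairsOf_concat_of_not_mem hx y).mp hy), hnil2⟩
        · right
          exact ⟨m, ⟨(mem_pairsOf_concat_of_not_mem hx m).mpr hb.1,
            fun y hy => hb.2 y ((mem_pairsOf_concat_of_not_mem hx y).mp hy)⟩, hsl, hml⟩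
    | some j =>
      have hlast : (idxsOf l x).getLast? = some j := by rw [← hseen x]; exact hj
      have hne : idxsOf l x ≠ [] := by intro h; rw [h] at hlast; simp at hlast
      have hx : x ∈ l := by
        by_contra hxx
        exact hne (idxsOf_eq_nil_iff.mpr hxx)
      have hjmem : j ∈ idxsOf l x := getLast?_mem hlast
      obtain ⟨hj0, hjlt⟩ := mem_idxsOf_bounds hjmem
      have hLL : (l.length : Int) ≤ (L.length : Int) := by exact_mod_cast Nat.le_of_succ_le hlenL
      have hcur : ((PySem.List.slice L (some j) (some (l.length : Int))).length : Int)
          = (l.length : Int) - j := length_slice_int L hj0 (le_of_lt hjlt) hLL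
      rw [stepA_eq_some L _ _ x j hj]
      refine ⟨?_, ?_⟩
      · intro y
        by_cases hyx : y = x
        · subst hyx
          show ((loopA L l).1.insert y (l.length : Int)).get? y = _
          rw [PySem.Dict.get?_insert_self, idxsOf_append, if_pos rfl, List.getLast?_concat]
        · show ((loopA L l).1.insert x (l.length : Int)).get? y = _
          rw [PySem.Dict.get?_insert_of_ne _ _ hyx, hseen y,
              idxsOf_append, if_neg (fun h => hyx h.symm), List.append_nil]
      · show OutInv L (l ++ [x])
          (if (PySem.List.slice L (some j) (some (l.length : Int))).length > (loopA L l).2.length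
           then PySem.List.slice L (some j) (some (l.length : Int)) else (loopA L l).2)
        rcases hout with ⟨hemp, hnil2⟩ | ⟨m, hb, hsl, hml⟩
        · right
          rw [hnil2, if_pos (by simp; omega)]
          refine ⟨((l.length : Int) - j, -(l.length : Int)), ⟨?_, ?_⟩, ?_, ?_⟩
          · exact (mem_pairsOf_concat_of_mem hx hlast _).mpr (Or.inr rfl)
          · intro y hy
            rcases (mem_pairsOf_concat_of_mem hx hlast y).mp hy with hy' | rfl
            · exact absurd hy' (hemp y)
            · exact lexLe_refl _
          · show PySem.List.slice L (some j) (some (l.length : Int))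
              = PySem.List.slice L (some (-(-(l.length : Int)) - ((l.length : Int) - j)))
                  (some (-(-(l.length : Int))))
            rw [show -(-(l.length : Int)) - ((l.length : Int) - j) = j by ring,
                show -(-(l.length : Int)) = (l.length : Int) by ring]
          · exact hcur
        · by_cases hgt : (PySem.List.slice L (some j) (some (l.length : Int))).length
              > (loopA L l).2.length
          · rw [if_pos hgt]
            right
            refine ⟨((l.length : Int) - j, -(l.length : Int)), ⟨?_, ?_⟩, ?_, ?_⟩
            · exact (mem_pairsOf_concat_of_mem hx hlast _).mpr (Or.inr rfl)
            · intro y hy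
              rcases (mem_pairsOf_concat_of_mem hx hlast y).mp hy with hy' | rfl
              · have hym := hb.2 y hy'
                unfold lexLe at hym ⊢
                show y.1 < (l.length : Int) - j ∨ (y.1 = (l.length : Int) - j ∧ y.2 ≤ -(l.length : Int))
                omega
              · exact lexLe_refl _
            · show PySem.List.slice L (some j) (some (l.length : Int))
                = PySem.List.slice L (some (-(-(l.length : Int)) - ((l.length : Int) - j)))
                    (some (-(-(l.length : Int))))
              rw [show -(-(l.length : Int)) - ((l.length : Int) - j) = j by ring,
                  show -(-(l.length : Int)) = (l.length : Int) by ring]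
            · exact hcur
          · rw [if_neg hgt]
            right
            have hbnd := mem_pairsOf_bounds hb.1
            refine ⟨m, ⟨(mem_pairsOf_concat_of_mem hx hlast m).mpr (Or.inl hb.1), ?_⟩, hsl, hml⟩
            intro y hy
            rcases (mem_pairsOf_concat_of_mem hx hlast y).mp hy with hy' | rfl
            · exact hb.2 y hy'
            · unfold lexLe
              show (l.length : Int) - j < m.1 ∨ ((l.length : Int) - j = m.1 ∧ -(l.length : Int) ≤ m.2)
              omega

lemma buildOcc_concat (l : List Int) (x : Int) :
    buildOcc (l ++ [x]) = (buildOcc l).modify x [] (fun v => v ++ [(l.length : Int)]) := by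
  unfold buildOcc
  rw [PySem.List.enumerate_append, List.foldl_append]
  simp [PySem.List.enumerate_cons, PySem.List.enumerate_nil]

lemma occ_getD (lst : List Int) : ∀ x : Int, (buildOcc lst).getD x [] = idxsOf lst x := by
  induction lst using List.reverseRecOn with
  | nil => intro x; rfl
  | append_singleton l z ihl =>
    intro x
    rw [buildOcc_concat]
    simp only [PySem.Dict.modify]
    by_cases hxz : x = z
    · subst hxz
      rw [PySem.Dict.getD_insert_self, ihl x, idxsOf_append, if_pos rfl]
    · rw [PySem.Dict.getD_insert_of_ne _ _ _ hxz, ihl x, idxsOf_append,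
          if_neg (fun h => hxz h.symm), List.append_nil]

lemma occ_keys (lst : List Int) : (buildOcc lst).keys = PySem.List.dedup lst := by
  have h : (buildOcc lst).keys
      = PySem.Set.update (PySem.Dict.empty : PySem.Dict Int (List Int)).keys
          ((PySem.List.enumerate lst 0).map (fun p => p.2)) :=
    PySem.Dict.keys_foldl_modify_key (PySem.List.enumerate lst 0) (fun p => p.2) []
      (fun _ p v => v ++ [p.1]) PySem.Dict.empty
  rw [h, PySem.Dict.keys_empty, PySem.List.map_snd_enumerate]
  rfl

lemma B_char (lst : List Int) :
    longest_slice_between_duplicate_elements_alt lst =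
    match PySem.List.max2? (pairsOf lst) Prod.fst Prod.snd with
    | none => []
    | some m => PySem.List.slice lst (some (-m.2 - m.1)) (some (-m.2)) := by
  have hpairs : (buildOcc lst).values.flatMap gapsB = pairsOf lst := by
    have hnd : (buildOcc lst).keys.Nodup := by
      rw [occ_keys]; exact PySem.List.nodup_dedup lst
    rw [PySem.Dict.values_eq_map_keys (buildOcc lst) hnd [], occ_keys, List.flatMap_map]
    have hf : (fun a => gapsB ((buildOcc lst).getD a [])) = (fun a => gapsP (idxsOf lst a)) := by
      funext a
      rw [occ_getD lst a, gapsB_eq_gapsP]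
    rw [hf]
    rfl
  rw [show longest_slice_between_duplicate_elements_alt lst
      = (match PySem.List.max2? ((buildOcc lst).values.flatMap gapsB) Prod.fst Prod.snd with
         | none => ([] : List Int)
         | some m => PySem.List.slice lst (some (-m.2 - m.1)) (some (-m.2))) from rfl, hpairs]

-- ===== VERDICT (by name: the statement is the Claim_ definition above) =====
theorem longest_slice_between_duplicate_elements_spec : Claim_equal_longest_slice_between_duplicate_elements := by
  intro lst _
  unfold Spec_longest_slice_between_duplicate_elements
  rw [B_char]
  have hA := A_loop lst lst (List.prefix_refl lst)
  have hout : OutInv lst lst (longest_slice_between_duplicate_elements lst) := hA.2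
  rcases hout with ⟨hemp, hnil⟩ | ⟨m, hbest, hslice, _⟩
  · have hp : pairsOf lst = [] := List.eq_nil_iff_forall_not_mem.mpr hemp
    rw [hp, hnil]
    rfl
  · cases hp : pairsOf lst with
    | nil => exact absurd (hp ▸ hbest.1) (by simp)
    | cons a t =>
      obtain ⟨m', hm', hbest'⟩ := max2?_isBest t a
      rw [hp] at hbest
      have hmm : m = m' := isBest_unique hbest hbest'
      rw [hm', ← hmm, hslice]
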